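-- pv_equiv track=rewrite | github.com/TeenSpirit1408/Python368lab5 | Python368lab6/Ex 3.py | get_percentile_number
-- ===== SOURCE A (Python) =====
-- def get_percentile_number(value, percentiles):
--     max = 0
--     imax = 0
--     for i in range(len(percentiles)):
--         if (max <= percentiles[i]) &  (percentiles[i] <= value):
--             max = percentiles[i]
--             imax = i
--     return imax
-- ===== SOURCE B (Python) =====
-- def get_percentile_number(value, percentiles):
--     best = max((p for p in percentiles if 0 <= p <= value), default=0)
--     result = 0
--     for i, p in enumerate(percentiles):
--         if 0 <= p <= value and p == best:
--             result = i
--     return result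
-- ===== Notes on version B (the rewrite author's own statement) =====
-- stated objective: alternative
-- what changed: Replaces A's single incremental running-max/argmax pass by two passes: first compute the maximum qualifying percentile (max over a filtered generator, default 0), then scan enumerate(percentiles) recording the last index whose qualifying value equals that maximum.
import Mathlib
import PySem

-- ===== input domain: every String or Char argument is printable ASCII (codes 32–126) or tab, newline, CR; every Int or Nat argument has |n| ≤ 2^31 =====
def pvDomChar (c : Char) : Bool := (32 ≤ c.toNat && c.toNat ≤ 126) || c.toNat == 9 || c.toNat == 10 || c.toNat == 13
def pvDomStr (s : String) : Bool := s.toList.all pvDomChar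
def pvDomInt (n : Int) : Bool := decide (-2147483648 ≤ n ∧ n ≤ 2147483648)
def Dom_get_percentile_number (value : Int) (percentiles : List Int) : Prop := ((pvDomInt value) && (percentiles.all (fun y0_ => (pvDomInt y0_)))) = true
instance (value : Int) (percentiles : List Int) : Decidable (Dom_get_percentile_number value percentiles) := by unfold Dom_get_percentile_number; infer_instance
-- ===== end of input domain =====

-- B replaces A's single incremental running-max pass by a compute-the-maximum pass
-- followed by a locate-the-last-matching-index pass (objective: alternative decomposition).

-- ===== PORT A =====
def get_percentile_number (value : Int) (percentiles : List Int) : Int :=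
  (List.foldl
    (fun (s : Int × Int) (i : Int) =>
      if s.1 ≤ PySem.List.pyGetD percentiles i 0 ∧ PySem.List.pyGetD percentiles i 0 ≤ value
      then (PySem.List.pyGetD percentiles i 0, i)
      else s)
    (0, 0)
    (PySem.List.pyRange 0 (percentiles.length : Int))).2

-- ===== PORT B =====
def get_percentile_number_alt (value : Int) (percentiles : List Int) : Int :=
  let best := PySem.List.maxD (percentiles.filter (fun p => decide (0 ≤ p ∧ p ≤ value))) (fun p => p) 0
  List.foldl
    (fun (result : Int) (ip : Int × Int) =>
      if 0 ≤ ip.2 ∧ ip.2 ≤ value ∧ ip.2 = best then ip.1 else result)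
    0
    (PySem.List.enumerate percentiles 0)

-- ===== PRECONDITION & SPEC =====
def Spec_get_percentile_number (value : Int) (percentiles : List Int) (out : Int) : Prop := out = get_percentile_number_alt value percentiles
instance (value : Int) (percentiles : List Int) (out : Int) : Decidable (Spec_get_percentile_number value percentiles out) := by unfold Spec_get_percentile_number; infer_instance

-- ===== CLAIM (what is proved, stated in full; the proofs are below) =====
def Claim_equal_get_percentile_number : Prop := ∀ (value : Int) (percentiles : List Int), Dom_get_percentile_number value percentiles → Spec_get_percentile_number value percentiles (get_percentile_number value percentiles)

-- ===== LEMMAS AND PROOFS =====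

-- The simple running-max-with-skip formulation of B's "best".
def pvBest (value : Int) (xs : List Int) : Int :=
  xs.foldl (fun b p => if 0 ≤ p ∧ p ≤ value then max b p else b) 0

-- B's maxD-over-filter equals the running max (generalized over the fold state).
lemma pvMaxAux (value : Int) (l : List Int) (o : Option Int) (b : Int)
    (h : o.getD 0 = b) (h0 : 0 ≤ b) :
    (List.foldl
      (fun acc x => match acc with
        | none => some x
        | some m => if m < x then some x else some m)
      o (l.filter (fun p => decide (0 ≤ p ∧ p ≤ value)))).getD 0
      = l.foldl (fun b p => if 0 ≤ p ∧ p ≤ value then max b p else b) b := by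
  induction l generalizing o b with
  | nil => simpa using h
  | cons p t ih =>
    by_cases hq : 0 ≤ p ∧ p ≤ value
    · rw [List.filter_cons_of_pos (by simpa using hq), List.foldl_cons, List.foldl_cons]
      cases o with
      | none =>
        simp only [Option.getD_none] at h
        subst h
        simp only [if_pos hq]
        exact ih (some p) (max 0 p) (by simp [max_eq_right hq.1]) (le_max_left 0 p)
      | some m =>
        simp only [Option.getD_some] at h
        subst h
        simp only [if_pos hq]
        refine ih (if m < p then some p else some m) (max m p) ?_ (le_trans h0 (le_max_left m p))
        split_ifs with hlt
        · simp [max_eq_right (le_of_lt hlt)]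
        · simp [max_eq_left (le_of_not_gt hlt)]
    · rw [List.filter_cons_of_neg (by simpa using hq), List.foldl_cons]
      simp only [if_neg hq]
      exact ih o b h h0

lemma pvBest_eq (value : Int) (xs : List Int) :
    PySem.List.maxD (xs.filter (fun p => decide (0 ≤ p ∧ p ≤ value))) (fun p => p) 0
      = pvBest value xs := by
  unfold PySem.List.maxD PySem.List.max? pvBest
  convert pvMaxAux value xs none 0 rfl le_rfl using 3
  funext acc x
  cases acc <;> rfl

lemma pvBest_nonneg_aux (value : Int) (xs : List Int) (b : Int) (h0 : 0 ≤ b) :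
    0 ≤ xs.foldl (fun b p => if 0 ≤ p ∧ p ≤ value then max b p else b) b := by
  induction xs generalizing b with
  | nil => simpa using h0
  | cons p t ih =>
    simp only [List.foldl_cons]
    split_ifs with hq
    · exact ih (max b p) (le_trans h0 (le_max_left b p))
    · exact ih b h0

lemma pvBest_nonneg (value : Int) (xs : List Int) : 0 ≤ pvBest value xs :=
  pvBest_nonneg_aux value xs 0 le_rfl

lemma pvBest_append (value : Int) (xs : List Int) (x : Int) :
    pvBest value (xs ++ [x])
      = if 0 ≤ x ∧ x ≤ value then max (pvBest value xs) x else pvBest value xs := by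
  simp [pvBest, List.foldl_append]

-- Main invariant: A's fold state is (best, last index achieving best).
lemma pvMain (value : Int) (xs : List Int) :
    List.foldl
      (fun (s : Int × Int) (i : Int) =>
        if s.1 ≤ PySem.List.pyGetD xs i 0 ∧ PySem.List.pyGetD xs i 0 ≤ value
        then (PySem.List.pyGetD xs i 0, i)
        else s)
      (0, 0)
      (PySem.List.pyRange 0 (xs.length : Int))
    = (pvBest value xs,
       List.foldl
        (fun (result : Int) (ip : Int × Int) =>
          if 0 ≤ ip.2 ∧ ip.2 ≤ value ∧ ip.2 = pvBest value xs then ip.1 else result)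
        0 (PySem.List.enumerate xs 0)) := by
  induction xs using List.reverseRecOn with
  | nil =>
    simp [pvBest, PySem.List.pyRange_one_eq_nil le_rfl, PySem.List.enumerate_nil]
  | append_singleton xs x ih =>
    have h0 : (0 : Int) ≤ pvBest value xs := pvBest_nonneg value xs
    have hlen : (((xs ++ [x]).length : Int)) = (xs.length : Int) + 1 := by
      simp
    rw [hlen, PySem.List.pyRange_one_succ_right (by positivity), List.foldl_append]
    -- the prefix of A's fold only reads indices of xs
    have hcongr :
        List.foldl
          (fun (s : Int × Int) (i : Int) =>
            if s.1 ≤ PySem.List.pyGetD (xs ++ [x]) i 0 ∧ PySem.List.pyGetD (xs ++ [x]) i 0 ≤ value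
            then (PySem.List.pyGetD (xs ++ [x]) i 0, i) else s)
          (0, 0) (PySem.List.pyRange 0 (xs.length : Int))
        = List.foldl
          (fun (s : Int × Int) (i : Int) =>
            if s.1 ≤ PySem.List.pyGetD xs i 0 ∧ PySem.List.pyGetD xs i 0 ≤ value
            then (PySem.List.pyGetD xs i 0, i) else s)
          (0, 0) (PySem.List.pyRange 0 (xs.length : Int)) := by
      refine PySem.List.foldl_congr_mem _ _ _ _ ?_
      intro acc i hi
      obtain ⟨h1, h2⟩ := PySem.List.mem_pyRange_one.mp hi
      have hget : PySem.List.pyGetD (xs ++ [x]) i 0 = PySem.List.pyGetD xs i 0 := by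
        rw [PySem.List.pyGetD_eq_getElem _ _ h1 (by simp; omega),
            PySem.List.pyGetD_eq_getElem _ _ h1 (by exact_mod_cast h2)]
        exact List.getElem_append_left (by omega)
      rw [hget]
    have hx : PySem.List.pyGetD (xs ++ [x]) ((xs.length : Int)) 0 = x := by
      rw [PySem.List.pyGetD_eq_getElem _ _ (by positivity) (by simp)]
      simp
    rw [hcongr, ih, List.foldl_cons, List.foldl_nil, hx]
    rw [PySem.List.enumerate_append, List.foldl_append, PySem.List.enumerate_cons,
        PySem.List.enumerate_nil, List.foldl_cons, List.foldl_nil]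
    rw [pvBest_append]
    by_cases hq : 0 ≤ x ∧ x ≤ value
    · rw [if_pos hq]
      by_cases hle : pvBest value xs ≤ x
      · -- A updates; B's best is x and the last B step fires
        rw [if_pos ⟨hle, hq.2⟩, max_eq_right hle]
        have hcond : 0 ≤ x ∧ x ≤ value ∧ x = x := ⟨hq.1, hq.2, rfl⟩
        rw [if_pos hcond]
        simp
      · -- x below the running best: nothing changes on either side
        have hmax : max (pvBest value xs) x = pvBest value xs := max_eq_left (le_of_not_ge hle)
        rw [hmax, if_neg (by intro hc; exact hle hc.1),
            if_neg (by intro hc; exact hle (le_of_eq hc.2.2.symm))]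
    · rw [if_neg hq]
      have hnc : ¬ (pvBest value xs ≤ x ∧ x ≤ value) := by
        intro hc
        exact hq ⟨le_trans h0 hc.1, hc.2⟩
      rw [if_neg hnc, if_neg (by intro hc; exact hq ⟨hc.1, hc.2.1⟩)]

-- ===== VERDICT (by name: the statement is the Claim_ definition above) =====
theorem get_percentile_number_spec : Claim_equal_get_percentile_number := by
  intro value percentiles _
  unfold Spec_get_percentile_number get_percentile_number get_percentile_number_alt
  rw [pvMain value percentiles, pvBest_eq]
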